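-- pv_equiv track=rewrite | github.com/UMBC-CMSC-Hamilton/cmsc201spring2024 | recursion_day_2.py | matching_parens_alt
-- ===== SOURCE A (Python) =====
-- def matching_parens_alt(a_string):
--     if not a_string:
--         return 0
--
--     if a_string[0] == "(":
--         count = matching_parens_alt(a_string[1:])
--         if count >= 0:
--             return 1 + count
--         else:
--             return -1
--     elif a_string[0] == ")":
--         count = matching_parens_alt(a_string[1:])
--         return (-1) + count
--     else:
--         return 0 + matching_parens_alt(a_string[1:])
-- ===== SOURCE B (Python) =====
-- def matching_parens_alt(a_string):
--     acc = 0
--     for ch in reversed(a_string):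
--         if ch == "(":
--             acc = 1 + acc if acc >= 0 else -1
--         elif ch == ")":
--             acc = acc - 1
--     return acc
-- ===== Notes on version B (the rewrite author's own statement) =====
-- stated objective: faster
-- what changed: Replaced the O(n^2) recursion with per-call string slicing by a single right-to-left iterative fold carrying an accumulator, no slicing.
import Mathlib
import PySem

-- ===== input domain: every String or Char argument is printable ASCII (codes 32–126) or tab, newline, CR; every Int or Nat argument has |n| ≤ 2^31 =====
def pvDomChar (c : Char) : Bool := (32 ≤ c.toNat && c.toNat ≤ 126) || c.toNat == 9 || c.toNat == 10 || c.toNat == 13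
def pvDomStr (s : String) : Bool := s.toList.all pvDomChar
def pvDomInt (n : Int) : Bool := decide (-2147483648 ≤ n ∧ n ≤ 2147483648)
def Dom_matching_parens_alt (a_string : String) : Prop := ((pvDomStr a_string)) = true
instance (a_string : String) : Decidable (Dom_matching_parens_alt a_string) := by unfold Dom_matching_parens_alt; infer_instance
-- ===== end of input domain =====

-- B replaces A's O(n^2) slicing recursion with a single right-to-left fold (asymptotically faster); same return value for all strings.
-- ===== PORT A =====
def pvGoA : List Char → Int
  | [] => 0
  | c :: rest =>
    if c = '(' then
      let count := pvGoA rest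
      if count ≥ 0 then 1 + count else -1
    else if c = ')' then
      (-1) + pvGoA rest
    else
      0 + pvGoA rest

def matching_parens_alt (a_string : String) : Int := pvGoA a_string.toList

-- ===== PORT B =====
def pvStepB (acc : Int) (c : Char) : Int :=
  if c = '(' then (if acc ≥ 0 then 1 + acc else -1)
  else if c = ')' then acc - 1
  else acc

def matching_parens_alt_alt (a_string : String) : Int :=
  a_string.toList.reverse.foldl pvStepB 0

-- ===== PRECONDITION & SPEC =====
def Spec_matching_parens_alt (a_string : String) (out : Int) : Prop := out = matching_parens_alt_alt a_string
instance (a_string : String) (out : Int) : Decidable (Spec_matching_parens_alt a_string out) := by unfold Spec_matching_parens_alt; infer_instance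

-- ===== CLAIM (what is proved, stated in full; the proofs are below) =====
def Claim_equal_matching_parens_alt : Prop := ∀ (a_string : String), Dom_matching_parens_alt a_string → Spec_matching_parens_alt a_string (matching_parens_alt a_string)

-- ===== LEMMAS AND PROOFS =====

-- ===== VERDICT (by name: the statement is the Claim_ definition above) =====
theorem pvGoA_eq_foldr (l : List Char) :
    pvGoA l = l.foldr (fun c acc => pvStepB acc c) 0 := by
  induction l with
  | nil => rfl
  | cons c rest ih =>
    simp only [pvGoA, List.foldr, pvStepB, ih]
    split_ifs <;> omega

theorem matching_parens_alt_spec : Claim_equal_matching_parens_alt := by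
  intro s _
  unfold Spec_matching_parens_alt matching_parens_alt matching_parens_alt_alt
  rw [List.foldl_reverse, pvGoA_eq_foldr]
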